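-- pv_equiv track=rewrite | github.com/dinay-kingkiller/pseudocode | vote/test/helpers.py | scored_to_choice
-- ===== SOURCE A (Python) =====
-- def scored_to_choice(ballot):
--     best_score = max(ballot.values())
--     winners = [
--         candidate for candidate in ballot if ballot[candidate] == best_score]
--     if len(winners) == 1:
--         return winners[0]
--     else:
--         return None
-- ===== SOURCE B (Python) =====
-- def scored_to_choice(ballot):
--     best_candidate = None
--     best_score = None
--     count = 0
--     for candidate, score in ballot.items():
--         if best_score is None or score > best_score:
--             best_candidate = candidate
--             best_score = score
--             count = 1
--         elif score == best_score:
--             count += 1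
--     return best_candidate if count == 1 else None
-- ===== Notes on version B (the rewrite author's own statement) =====
-- stated objective: alternative
-- what changed: Replaced the max()-over-values pass followed by a filtering list comprehension (with a dict lookup per key) by a single fold over ballot.items() that maintains the best candidate, best score and the count of candidates at that score; B also returns None on an empty ballot where A's max() raises ValueError.
import Mathlib
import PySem

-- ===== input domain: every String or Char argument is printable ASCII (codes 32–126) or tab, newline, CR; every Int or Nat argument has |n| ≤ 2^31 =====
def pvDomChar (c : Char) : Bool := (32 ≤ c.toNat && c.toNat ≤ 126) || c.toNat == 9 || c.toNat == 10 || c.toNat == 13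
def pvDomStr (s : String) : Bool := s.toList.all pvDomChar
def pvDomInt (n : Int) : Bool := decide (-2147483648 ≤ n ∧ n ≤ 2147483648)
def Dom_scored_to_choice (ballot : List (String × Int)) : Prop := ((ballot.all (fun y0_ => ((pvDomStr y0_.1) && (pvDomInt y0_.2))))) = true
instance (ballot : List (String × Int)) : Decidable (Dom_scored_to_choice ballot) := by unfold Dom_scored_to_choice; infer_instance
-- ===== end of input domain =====

-- B replaces A's max()-pass plus filtering comprehension by a single fold keeping
-- (best candidate, best score, count at best score); same O(n) cost, different decomposition.

-- ===== PORT A =====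
-- dict lookup ballot[candidate]: first (only) match in the association list
def pvDictGet? (l : List (String × Int)) (k : String) : Option Int :=
  match l with
  | [] => none
  | (a, b) :: t => if a == k then some b else pvDictGet? t k

def scored_to_choice (ballot : List (String × Int)) : Option String :=
  -- best_score = max(ballot.values()); max() raises on an empty ballot (excluded by Pre_)
  match PySem.List.max? (ballot.map Prod.snd) (fun v => v) with
  | none => none
  | some best_score =>
    let winners := (ballot.map Prod.fst).filter
      (fun candidate => pvDictGet? ballot candidate == some best_score)
    if winners.length = 1 then PySem.List.pyGet? winners 0 else none

-- ===== PORT B =====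
-- loop body of B: state = (best_candidate, best_score, count)
def pvAltStep (s : Option String × Option Int × Int) (p : String × Int) :
    Option String × Option Int × Int :=
  match s.2.1 with
  | none => (some p.1, some p.2, 1)
  | some b =>
    if b < p.2 then (some p.1, some p.2, 1)
    else if p.2 == b then (s.1, s.2.1, s.2.2 + 1)
    else s

def scored_to_choice_alt (ballot : List (String × Int)) : Option String :=
  let st := ballot.foldl pvAltStep (none, none, 0)
  if st.2.2 == 1 then st.1 else none

-- ===== PRECONDITION & SPEC =====
-- Pre_ excludes the empty ballot, on which A's max() raises ValueError, and association
-- lists with duplicate keys, which a Python dict (A's actual argument type) cannot represent.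
def Pre_scored_to_choice (ballot : List (String × Int)) : Prop :=
  ballot ≠ [] ∧ (ballot.map Prod.fst).Nodup
instance (ballot : List (String × Int)) : Decidable (Pre_scored_to_choice ballot) := by
  unfold Pre_scored_to_choice; infer_instance

def pvWitness_scored_to_choice : (List (String × Int)) := [("a", 1), ("b", 2)]

def Spec_scored_to_choice (ballot : List (String × Int)) (out : Option String) : Prop :=
  out = scored_to_choice_alt ballot
instance (ballot : List (String × Int)) (out : Option String) :
    Decidable (Spec_scored_to_choice ballot out) := by unfold Spec_scored_to_choice; infer_instance

-- ===== CLAIM (what is proved, stated in full; the proofs are below) =====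
def Claim_equal_scored_to_choice : Prop := ∀ (ballot : List (String × Int)),
  Dom_scored_to_choice ballot → Pre_scored_to_choice ballot →
  Spec_scored_to_choice ballot (scored_to_choice ballot)

-- ===== LEMMAS AND PROOFS =====

-- running best of B, as a fold keeping the first strictly-greater element
def pvRunBest (t : List (String × Int)) (p : String × Int) : String × Int :=
  t.foldl (fun acc q => if acc.2 < q.2 then q else acc) p

def pvCountV (t : List (String × Int)) (m : Int) : Nat :=
  (t.filter (fun p => p.2 == m)).length

lemma pvRunBest_ge : ∀ (t : List (String × Int)) (p : String × Int), p.2 ≤ (pvRunBest t p).2 := by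
  intro t
  induction t with
  | nil => intro p; simp [pvRunBest]
  | cons q t ih =>
    intro p
    simp only [pvRunBest, List.foldl_cons]
    by_cases h : p.2 < q.2
    · simp only [if_pos h]; exact le_of_lt (lt_of_lt_of_le h (ih q))
    · simp only [if_neg h]; exact ih p

lemma pvCountV_cons (d : String) (e : Int) (t : List (String × Int)) (m : Int) :
    pvCountV ((d, e) :: t) m = (if e = m then 1 else 0) + pvCountV t m := by
  by_cases h : e = m
  · simp [pvCountV, h]; omega
  · simp [pvCountV, h]

lemma pvRunBest_step (d : String) (e : Int) (t : List (String × Int)) (p : String × Int) :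
    pvRunBest ((d, e) :: t) p = pvRunBest t (if p.2 < e then (d, e) else p) := by
  rfl

lemma pvRunBest_snd : ∀ (t : List (String × Int)) (p : String × Int),
    (pvRunBest t p).2 = (t.map Prod.snd).foldl max p.2 := by
  intro t
  induction t with
  | nil => intro p; simp [pvRunBest]
  | cons q t ih =>
    intro p
    obtain ⟨d, e⟩ := q
    rw [pvRunBest_step, List.map_cons, List.foldl_cons]
    by_cases h : p.2 < e
    · rw [if_pos h, ih]; congr 1; omega
    · rw [if_neg h, ih]; congr 1; omega

lemma pvLoop_char : ∀ (t : List (String × Int)) (c : String) (b : Int) (k : Int),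
    t.foldl pvAltStep (some c, some b, k) =
      (some (pvRunBest t (c, b)).1, some (pvRunBest t (c, b)).2,
       (if (pvRunBest t (c, b)).2 = b then k else 0) + (pvCountV t (pvRunBest t (c, b)).2 : Int)) := by
  intro t
  induction t with
  | nil => intro c b k; simp [pvRunBest, pvCountV]
  | cons q t ih =>
    intro c b k
    obtain ⟨d, e⟩ := q
    rw [pvRunBest_step]
    simp only [List.foldl_cons, pvAltStep]
    by_cases h : b < e
    · rw [if_pos h, if_pos h, ih d e 1]
      have hge : e ≤ (pvRunBest t (d, e)).2 := pvRunBest_ge t (d, e)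
      rw [pvCountV_cons]
      simp only [Prod.mk.injEq]
      refine ⟨trivial, trivial, ?_⟩
      push_cast
      split_ifs <;> omega
    · rw [if_neg h, if_neg h]
      have hvb : b ≤ (pvRunBest t (c, b)).2 := pvRunBest_ge t (c, b)
      by_cases he : e = b
      · have hbeq : ((e : Int) == b) = true := beq_iff_eq.mpr he
        rw [hbeq]
        simp only [if_true]
        rw [ih c b (k + 1), pvCountV_cons]
        simp only [Prod.mk.injEq]
        refine ⟨trivial, trivial, ?_⟩
        push_cast
        split_ifs <;> omega
      · have hbeq : ((e : Int) == b) = false := beq_eq_false_iff_ne.mpr he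
        rw [hbeq]
        simp only [Bool.false_eq_true, if_false]
        rw [ih c b k, pvCountV_cons]
        simp only [Prod.mk.injEq]
        refine ⟨trivial, trivial, ?_⟩
        push_cast
        split_ifs <;> omega

-- first element of the cons-list achieving the running best is the running best itself
lemma pvRunBest_head : ∀ (t : List (String × Int)) (p : String × Int),
    ((p :: t).filter (fun q => q.2 == (pvRunBest t p).2)).head? = some (pvRunBest t p) := by
  intro t
  induction t with
  | nil =>
    intro p
    simp [pvRunBest]
  | cons q t ih =>
    intro p
    obtain ⟨d, e⟩ := q
    obtain ⟨c, b⟩ := p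
    rw [pvRunBest_step]
    by_cases h : b < e
    · rw [if_pos h]
      have hge : e ≤ (pvRunBest t (d, e)).2 := pvRunBest_ge t (d, e)
      have hbne : ((b : Int) == (pvRunBest t (d, e)).2) = false :=
        beq_eq_false_iff_ne.mpr (by omega)
      rw [List.filter_cons]
      simp only [hbne, Bool.false_eq_true, if_false]
      exact ih (d, e)
    · rw [if_neg h]
      have hvb : b ≤ (pvRunBest t (c, b)).2 := pvRunBest_ge t (c, b)
      have iht := ih (c, b)
      by_cases hb : b = (pvRunBest t (c, b)).2
      · have hbeq : ((b : Int) == (pvRunBest t (c, b)).2) = true := beq_iff_eq.mpr hb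
        rw [List.filter_cons] at iht ⊢
        simp only [hbeq, if_true] at iht ⊢
        exact iht
      · have hbne : ((b : Int) == (pvRunBest t (c, b)).2) = false := beq_eq_false_iff_ne.mpr hb
        have hene : ((e : Int) == (pvRunBest t (c, b)).2) = false :=
          beq_eq_false_iff_ne.mpr (by omega)
        rw [List.filter_cons] at iht ⊢
        rw [List.filter_cons]
        simp only [hbne, hene, Bool.false_eq_true, if_false] at iht ⊢
        exact iht

-- with nodup keys, A's winners comprehension is the filtered entries' keys
lemma pvWinners_eq : ∀ (l : List (String × Int)), (l.map Prod.fst).Nodup → ∀ (m : Int),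
    (l.map Prod.fst).filter (fun c => pvDictGet? l c == some m) =
      (l.filter (fun p => p.2 == m)).map Prod.fst := by
  intro l
  induction l with
  | nil => intro _ m; simp
  | cons p t ih =>
    intro hnd m
    obtain ⟨a, b⟩ := p
    simp only [List.map_cons, List.nodup_cons] at hnd
    obtain ⟨ha, hnd'⟩ := hnd
    simp only [List.map_cons, List.filter_cons]
    have hself : pvDictGet? ((a, b) :: t) a = some b := by simp [pvDictGet?]
    have hcond : (pvDictGet? ((a, b) :: t) a == some m) = ((b : Int) == m) := by
      rw [hself]; cases hbm : ((b : Int) == m) <;> simp_all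
    have hrest : (t.map Prod.fst).filter (fun c => pvDictGet? ((a, b) :: t) c == some m) =
        (t.map Prod.fst).filter (fun c => pvDictGet? t c == some m) := by
      apply List.filter_congr
      intro c hc
      have hca : (a == c) = false := by
        cases h : (a == c)
        · rfl
        · exfalso; apply ha; simp at h; rw [h]; exact hc
      simp [pvDictGet?, hca]
    by_cases hbm : b = m
    · have : ((b : Int) == m) = true := by simp [hbm]
      rw [hcond, this, if_pos rfl, if_pos rfl, List.map_cons, hrest, ih hnd' m]
    · have : ((b : Int) == m) = false := by simp [beq_eq_false_iff_ne]; exact hbm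
      rw [hcond, this]
      simp only [Bool.false_eq_true, if_false]
      rw [hrest, ih hnd' m]

-- ===== VERDICT (by name: the statement is the Claim_ definition above) =====
theorem scored_to_choice_spec : Claim_equal_scored_to_choice := by
  intro ballot _hdom hpre
  obtain ⟨hne, hnd⟩ := hpre
  obtain ⟨⟨c, b⟩, t, rfl⟩ : ∃ p t, ballot = p :: t := by
    cases ballot with
    | nil => exact absurd rfl hne
    | cons p t => exact ⟨p, t, rfl⟩
  unfold Spec_scored_to_choice
  set B := pvRunBest t (c, b) with hB
  -- evaluate B's port
  have hb : scored_to_choice_alt ((c, b) :: t) =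
      if ((if B.2 = b then (1 : Int) else 0) + (pvCountV t B.2 : Int)) == 1 then some B.1 else none := by
    simp only [scored_to_choice_alt, List.foldl_cons, pvAltStep]
    rw [pvLoop_char t c b 1]
  -- evaluate A's port
  have hmax : PySem.List.max? (((c, b) :: t).map Prod.snd) (fun v => v) = some B.2 := by
    rw [List.map_cons, PySem.List.max?_id_cons, pvRunBest_snd]
  have hcnt : pvCountV ((c, b) :: t) B.2 =
      (if B.2 = b then 1 else 0) + pvCountV t B.2 := by
    rw [pvCountV_cons]
    by_cases hbb : b = B.2
    · simp [hbb]
    · have hne' : ¬ (B.2 = b) := fun h => hbb h.symm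
      simp [hbb, hne']
  have hw : (((c, b) :: t).map Prod.fst).filter
      (fun candidate => pvDictGet? ((c, b) :: t) candidate == some B.2) =
      (((c, b) :: t).filter (fun p => p.2 == B.2)).map Prod.fst :=
    pvWinners_eq ((c, b) :: t) hnd B.2
  simp only [scored_to_choice, hmax, hw]
  rw [hb]
  have hlen : (((( c, b) :: t).filter (fun p => p.2 == B.2)).map Prod.fst).length =
      pvCountV ((c, b) :: t) B.2 := by
    simp [pvCountV]
  rw [hlen, hcnt]
  by_cases h1 : (if B.2 = b then 1 else 0) + pvCountV t B.2 = 1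
  · rw [if_pos h1]
    have : ((if B.2 = b then (1 : Int) else 0) + (pvCountV t B.2 : Int)) == 1 := by
      rw [beq_iff_eq]
      by_cases hbb : B.2 = b
      · rw [if_pos hbb] at h1 ⊢; omega
      · rw [if_neg hbb] at h1 ⊢; omega
    rw [if_pos this]
    -- winners[0] is the head; by pvRunBest_head it is B
    have hhead := pvRunBest_head t (c, b)
    rw [← hB] at hhead
    have : ((((c, b) :: t).filter (fun p => p.2 == B.2)).map Prod.fst).head? = some B.1 := by
      rw [List.head?_map, hhead]; rfl
    cases hfil : (((c, b) :: t).filter (fun p => p.2 == B.2)).map Prod.fst with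
    | nil => rw [hfil] at this; simp at this
    | cons w ws =>
      rw [hfil] at this
      simp only [List.head?_cons, Option.some.injEq] at this
      simp [PySem.List.pyGet?, PySem.List.pyIdx?, this]
  · rw [if_neg h1]
    have : (((if B.2 = b then (1 : Int) else 0) + (pvCountV t B.2 : Int)) == 1) = false := by
      rw [beq_eq_false_iff_ne]
      by_cases hbb : B.2 = b
      · rw [if_pos hbb] at h1 ⊢; omega
      · rw [if_neg hbb] at h1 ⊢; omega
    rw [this]
    simp
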